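-- pv_equiv track=rewrite | github.com/krayc425/LeetCode | Python/Maximum Size Subarray Sum Equals k.py | maxSubArrayLen
-- ===== SOURCE A (Python) =====
-- from typing import List
-- from collections import defaultdict
--
-- def maxSubArrayLen(nums: List[int], k: int) -> int:
--     map = defaultdict(int)
--     map[0] = -1
--     sum = 0
--     res = 0
--     for idx, n in enumerate(nums):
--         sum += n
--         if sum - k in map:
--             res = max(res, idx - map[sum - k])
--         if sum not in map:
--             map[sum] = idx
--     return res
-- ===== SOURCE B (Python) =====
-- from typing import List
--
-- def maxSubArrayLen(nums: List[int], k: int) -> int: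
--     res = 0
--     for i in range(len(nums)):
--         s = 0
--         for off, x in enumerate(nums[i:]):
--             s += x
--             if s == k:
--                 res = max(res, off + 1)
--     return res
-- ===== Notes on version B (the rewrite author's own statement) =====
-- stated objective: simpler
-- what changed: Replaces A's single pass with a prefix-sum hashmap of first occurrences by the plain O(n^2) brute force: for every start index, a running sum over all end indices, recording the length whenever the sum hits k.
import Mathlib
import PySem

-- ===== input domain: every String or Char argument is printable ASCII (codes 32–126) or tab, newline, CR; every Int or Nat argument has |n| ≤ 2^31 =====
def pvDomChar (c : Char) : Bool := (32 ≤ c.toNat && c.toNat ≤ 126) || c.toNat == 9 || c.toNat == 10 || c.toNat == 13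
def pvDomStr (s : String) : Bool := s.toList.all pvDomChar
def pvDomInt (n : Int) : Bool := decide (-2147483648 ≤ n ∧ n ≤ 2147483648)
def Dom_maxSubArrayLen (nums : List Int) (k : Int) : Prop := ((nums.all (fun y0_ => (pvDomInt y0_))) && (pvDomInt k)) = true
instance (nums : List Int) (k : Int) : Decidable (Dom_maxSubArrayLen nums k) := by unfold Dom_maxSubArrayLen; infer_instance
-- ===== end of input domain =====

-- B replaces A's one-pass prefix-sum hashmap by the plain O(n^2) brute force over all start indices
-- (objective: simpler; equal return values proved below).

-- ===== PORT A =====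
-- loop body of A's single for-loop (state: (map, sum, res); element: (idx, n) from enumerate(nums))
def stepA (k : Int) (st : PySem.Dict Int Int × Int × Int) (p : Int × Int) :
    PySem.Dict Int Int × Int × Int :=
  let sum := st.2.1 + p.2
  let res := if st.1.contains (sum - k) then max st.2.2 (p.1 - st.1.getD (sum - k) 0) else st.2.2
  let map := if st.1.contains sum then st.1 else st.1.insert sum p.1
  (map, sum, res)

def maxSubArrayLen (nums : List Int) (k : Int) : Int :=
  ((PySem.List.enumerate nums 0).foldl (stepA k)
    (PySem.Dict.empty.insert 0 (-1), 0, 0)).2.2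

-- ===== PORT B =====
-- body of B's inner for-loop (state: (s, res); element: (off, x) from enumerate(nums[i:]))
def innerB (k : Int) (st : Int × Int) (p : Int × Int) : Int × Int :=
  let s := st.1 + p.2
  (s, if s = k then max st.2 (p.1 + 1) else st.2)

def maxSubArrayLen_alt (nums : List Int) (k : Int) : Int :=
  (PySem.List.pyRange 0 nums.length 1).foldl
    (fun res i =>
      ((PySem.List.enumerate (PySem.List.slice nums (some i) none) 0).foldl (innerB k) (0, res)).2)
    0

-- ===== PRECONDITION & SPEC =====
def Spec_maxSubArrayLen (nums : List Int) (k : Int) (out : Int) : Prop := out = maxSubArrayLen_alt nums k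
instance (nums : List Int) (k : Int) (out : Int) : Decidable (Spec_maxSubArrayLen nums k out) := by unfold Spec_maxSubArrayLen; infer_instance

-- ===== CLAIM (what is proved, stated in full; the proofs are below) =====
def Claim_equal_maxSubArrayLen : Prop := ∀ (nums : List Int) (k : Int), Dom_maxSubArrayLen nums k → Spec_maxSubArrayLen nums k (maxSubArrayLen nums k)

-- ===== LEMMAS AND PROOFS =====

-- (i, j) delimits a subarray nums[i:j] with sum k
def gd (nums : List Int) (k : Int) (i j : Nat) : Prop :=
  i < j ∧ j ≤ nums.length ∧ (nums.take j).sum - (nums.take i).sum = k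

-- r is the maximum of 0 and the lengths j - i of the good pairs selected by Q
def PairMax (nums : List Int) (k : Int) (Q : Nat → Nat → Prop) (r : Int) : Prop :=
  0 ≤ r ∧ (r = 0 ∨ ∃ i j, gd nums k i j ∧ Q i j ∧ r = (j : Int) - i) ∧
  ∀ i j, gd nums k i j → Q i j → (j : Int) - (i : Int) ≤ r

lemma IsMax_congr {nums : List Int} {k : Int} {Q Q' : Nat → Nat → Prop} {r : Int}
    (hQ : ∀ i j, gd nums k i j → (Q i j ↔ Q' i j)) (h : PairMax nums k Q r) :
    PairMax nums k Q' r := by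
  obtain ⟨h0, hex, hub⟩ := h
  refine ⟨h0, ?_, fun i j hg hq => hub i j hg ((hQ i j hg).mpr hq)⟩
  rcases hex with h | ⟨i, j, hg, hq, hr⟩
  · exact Or.inl h
  · exact Or.inr ⟨i, j, hg, (hQ i j hg).mp hq, hr⟩

lemma IsMax_unique {nums : List Int} {k : Int} {Q Q' : Nat → Nat → Prop} {r r' : Int}
    (hq : ∀ i j, gd nums k i j → Q i j) (hq' : ∀ i j, gd nums k i j → Q' i j)
    (h : PairMax nums k Q r) (h' : PairMax nums k Q' r') : r = r' := by
  obtain ⟨h0, hex, hub⟩ := h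
  obtain ⟨h0', hex', hub'⟩ := h'
  have h1 : r ≤ r' := by
    rcases hex with h | ⟨i, j, hg, _, hr⟩
    · omega
    · have := hub' i j hg (hq' i j hg); omega
  have h2 : r' ≤ r := by
    rcases hex' with h | ⟨i, j, hg, _, hr⟩
    · omega
    · have := hub i j hg (hq i j hg); omega
  omega

lemma IsMax_init (nums : List Int) (k : Int) (Q : Nat → Nat → Prop)
    (h : ∀ i j, gd nums k i j → ¬ Q i j) : PairMax nums k Q 0 :=
  ⟨le_refl 0, Or.inl rfl, fun i j hg hq => absurd hq (h i j hg)⟩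

-- the list [P 0, …, P n] of prefix sums (used to characterize A's map)
def plist (nums : List Int) : List Int :=
  (List.range (nums.length + 1)).map (fun t => (nums.take t).sum)

lemma length_plist (nums : List Int) : (plist nums).length = nums.length + 1 := by simp [plist]

lemma getElem_plist (nums : List Int) (t : Nat) (h : t < nums.length + 1) :
    (plist nums)[t]'(by rw [length_plist]; omega) = (nums.take t).sum := by
  simp [plist]

lemma index?_append_single {α : Type} [DecidableEq α] (l : List α) (c v : α) :
    PySem.List.index? (l ++ [c]) v =
      if v ∈ l then PySem.List.index? l v
      else if v = c then some l.length else none := by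
  by_cases h : v ∈ l
  · rw [if_pos h, PySem.List.index?_append_of_mem _ h]
  · rw [if_neg h]
    by_cases hc : v = c
    · subst hc
      rw [if_pos rfl, PySem.List.index?_append_singleton_self _ _ h]
    · rw [if_neg hc, PySem.List.index?_eq_none_iff]
      simp [h, hc]

-- ============ A satisfies PairMax ============

lemma A_loop (nums : List Int) (k : Int) : ∀ (ys : List Int) (t : Nat)
    (map : PySem.Dict Int Int) (res : Int),
    t + ys.length = nums.length →
    ys = nums.drop t →
    (∀ s : Int, map.get? s =
      (PySem.List.index? ((plist nums).take (t + 1)) s).map (fun i => (i : Int) - 1)) →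
    PairMax nums k (fun _ j => j ≤ t) res →
    PairMax nums k (fun _ j => j ≤ nums.length)
      (((PySem.List.enumerate ys (t : Int)).foldl (stepA k) (map, (nums.take t).sum, res)).2.2) := by
  intro ys
  induction ys with
  | nil =>
    intro t map res hlen hys hinv hres
    simp only [List.length_nil, Nat.add_zero] at hlen
    subst hlen
    simpa [PySem.List.enumerate_nil] using hres
  | cons x ys ih =>
    intro t map res hlen hys hinv hres
    have htn : t < nums.length := by simp at hlen; omega
    have hx : nums.drop t = nums[t] :: nums.drop (t + 1) := List.drop_eq_getElem_cons htn
    rw [hx] at hys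
    obtain ⟨hx1, hys'⟩ : x = nums[t] ∧ ys = nums.drop (t + 1) := by
      constructor <;> [exact (List.cons.injEq .. ▸ hys).1; exact (List.cons.injEq .. ▸ hys).2]
    set S := (nums.take (t + 1)).sum with hS
    have hSsum : (nums.take t).sum + x = S := by
      rw [hx1, hS, List.sum_take_succ nums t htn]
    have ht1 : t + 1 < (plist nums).length := by rw [length_plist]; omega
    have htakeP : (plist nums).take (t + 2) = (plist nums).take (t + 1) ++ [S] := by
      rw [List.take_add_one]
      congr 1
      rw [List.getElem?_eq_getElem ht1, getElem_plist nums (t + 1) (by omega)]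
      rfl
    have hlentake : ((plist nums).take (t + 1)).length = t + 1 := by
      rw [List.length_take, length_plist]; omega
    have hgettake : ∀ (i : Nat) (h : i < t + 1),
        ((plist nums).take (t + 1))[i]'(by omega) = (nums.take i).sum := by
      intro i h
      rw [List.getElem_take, getElem_plist nums i (by omega)]
    rw [PySem.List.enumerate_cons, List.foldl_cons]
    have hcontains : ∀ v : Int, map.contains v = (PySem.List.index? ((plist nums).take (t + 1)) v).isSome := by
      intro v
      rw [PySem.Dict.contains_eq_isSome_get?, hinv v]
      cases PySem.List.index? ((plist nums).take (t + 1)) v <;> rfl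
    have hmem : ∀ v : Int, map.contains v = true ↔ v ∈ (plist nums).take (t + 1) := by
      intro v
      rw [hcontains v, ← PySem.List.index?_isSome_iff ((plist nums).take (t+1)) v]
    -- the updated map keeps the invariant at t+1
    have hinv' : ∀ s : Int,
        (if map.contains S then map else map.insert S (t : Int)).get? s =
          (PySem.List.index? ((plist nums).take (t + 1 + 1)) s).map (fun i => (i : Int) - 1) := by
      intro s
      have e : t + 1 + 1 = t + 2 := by omega
      rw [e, htakeP, index?_append_single]
      by_cases hc : map.contains S = true
      · rw [if_pos hc]
        by_cases hs : s ∈ (plist nums).take (t + 1)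
        · rw [if_pos hs, hinv s]
        · rw [if_neg hs]
          have hsne : s ≠ S := by
            intro h; exact hs (h ▸ (hmem S).mp hc)
          rw [if_neg hsne, hinv s, (PySem.List.index?_eq_none_iff _ _).mpr hs]
      · rw [if_neg hc]
        have hSnot : S ∉ (plist nums).take (t + 1) := fun h => hc ((hmem S).mpr h)
        by_cases hs : s = S
        · subst hs
          rw [if_neg hSnot, if_pos rfl, PySem.Dict.get?_insert_self, hlentake]
          simp
        · rw [PySem.Dict.get?_insert_of_ne _ _ hs, hinv s]
          by_cases hsm : s ∈ (plist nums).take (t + 1)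
          · rw [if_pos hsm]
          · rw [if_neg hsm, if_neg hs, (PySem.List.index?_eq_none_iff _ _).mpr hsm]
    -- the updated res satisfies PairMax at t+1
    have hres' : PairMax nums k (fun _ j => j ≤ t + 1)
        (if map.contains (S - k) then max res ((t : Int) - map.getD (S - k) 0) else res) := by
      obtain ⟨h0, hex, hub⟩ := hres
      by_cases hc : map.contains (S - k) = true
      · rw [if_pos hc]
        obtain ⟨i₀, hi₀⟩ : ∃ i₀, PySem.List.index? ((plist nums).take (t + 1)) (S - k) = some i₀ := by
          have h2 := hcontains (S - k); rw [hc] at h2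
          exact Option.isSome_iff_exists.mp h2.symm
        obtain ⟨hk₀, hv₀, hmin₀⟩ := PySem.List.getElem_of_index?_eq_some hi₀
        have hi₀lt : i₀ < t + 1 := by rw [hlentake] at hk₀; exact hk₀
        have hP₀ : (nums.take i₀).sum = S - k := by
          rw [← hgettake i₀ hi₀lt]; exact hv₀
        have hg₀ : gd nums k i₀ (t + 1) := by
          refine ⟨hi₀lt, by omega, by rw [hP₀, ← hS]; ring⟩
        have hget : map.getD (S - k) 0 = (i₀ : Int) - 1 := by
          rw [PySem.Dict.getD_eq_get?_getD, hinv (S - k), hi₀]; rfl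
        rw [hget]
        have hval : (t : Int) - ((i₀ : Int) - 1) = ((t + 1 : Nat) : Int) - i₀ := by push_cast; ring
        refine ⟨by omega, ?_, ?_⟩
        · rcases le_total ((t : Int) - ((i₀ : Int) - 1)) res with hle | hle
          · rw [max_eq_left hle]
            rcases hex with h | ⟨i, j, hg, hq, hr⟩
            · exact Or.inl h
            · exact Or.inr ⟨i, j, hg, by omega, hr⟩
          · rw [max_eq_right hle]
            exact Or.inr ⟨i₀, t + 1, hg₀, le_refl _, by omega⟩
        · intro i j hg hj
          rcases Nat.lt_or_ge j (t + 1) with hjt | hjt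
          · have := hub i j hg (by omega); omega
          · have hjeq : j = t + 1 := by omega
            subst hjeq
            obtain ⟨hij, _, hsum⟩ := hg
            have hPi : (nums.take i).sum = S - k := by rw [← hS] at hsum; omega
            have hile : i₀ ≤ i := by
              by_contra hlt
              exact hmin₀ i (by omega) (by rw [hgettake i (by omega)]; exact hPi)
            have : ((t + 1 : Nat) : Int) - i ≤ (t : Int) - ((i₀ : Int) - 1) := by push_cast; omega
            omega
      · rw [if_neg hc]
        have hnone : S - k ∉ (plist nums).take (t + 1) := fun h => hc ((hmem (S - k)).mpr h)
        refine ⟨h0, ?_, ?_⟩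
        · rcases hex with h | ⟨i, j, hg, hq, hr⟩
          · exact Or.inl h
          · exact Or.inr ⟨i, j, hg, by omega, hr⟩
        · intro i j hg hj
          rcases Nat.lt_or_ge j (t + 1) with hjt | hjt
          · have := hub i j hg (by omega); omega
          · have hjeq : j = t + 1 := by omega
            subst hjeq
            obtain ⟨hij, _, hsum⟩ := hg
            exfalso
            apply hnone
            have hPi : (nums.take i).sum = S - k := by rw [← hS] at hsum; omega
            have : ((plist nums).take (t + 1))[i]'(by omega) = S - k := by
              rw [hgettake i (by omega)]; exact hPi
            exact this ▸ List.getElem_mem _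
    have hstA : stepA k (map, (nums.take t).sum, res) ((t : Int), x)
        = ((if map.contains S then map else map.insert S (t : Int)), S,
           if map.contains (S - k) then max res ((t : Int) - map.getD (S - k) 0) else res) := by
      simp only [stepA]
      rw [hSsum]
    rw [hstA]
    have hcast : (t : Int) + 1 = ((t + 1 : Nat) : Int) := by push_cast; ring
    rw [hcast]
    exact ih (t + 1) _ _ (by simp at hlen; omega) hys' hinv' hres'

lemma take_one_plist (nums : List Int) : (plist nums).take 1 = [0] := by
  simp [plist, List.range_succ_eq_map]

lemma init_inv (nums : List Int) : ∀ s : Int,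
    (PySem.Dict.empty.insert 0 (-1) : PySem.Dict Int Int).get? s =
      (PySem.List.index? ((plist nums).take (0 + 1)) s).map (fun i => (i : Int) - 1) := by
  intro s
  rw [zero_add, take_one_plist]
  by_cases hs : s = 0
  · subst hs
    rw [PySem.Dict.get?_insert_self, PySem.List.index?_cons_self]
    rfl
  · rw [PySem.Dict.get?_insert_of_ne _ _ hs, PySem.Dict.get?_empty,
        (PySem.List.index?_eq_none_iff _ _).mpr (by simp [hs])]
    rfl

lemma A_isMax (nums : List Int) (k : Int) :
    PairMax nums k (fun _ j => j ≤ nums.length) (maxSubArrayLen nums k) := by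
  unfold maxSubArrayLen
  have h := A_loop nums k nums 0 (PySem.Dict.empty.insert 0 (-1)) 0
    (by simp) (by simp) (init_inv nums)
    (IsMax_init nums k _ (fun i j hg hq => by obtain ⟨h1, _, _⟩ := hg; omega))
  simpa using h

-- ============ B satisfies PairMax ============

lemma B_inner (nums : List Int) (k : Int) (i : Nat) : ∀ (ys : List Int) (off : Nat) (res : Int),
    ys = nums.drop (i + off) →
    i + off ≤ nums.length →
    PairMax nums k (fun i' j => i' < i ∨ (i' = i ∧ j ≤ i + off)) res →
    PairMax nums k (fun i' j => i' < i ∨ (i' = i ∧ j ≤ nums.length))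
      (((PySem.List.enumerate ys (off : Int)).foldl (innerB k)
        ((nums.take (i + off)).sum - (nums.take i).sum, res)).2) := by
  intro ys
  induction ys with
  | nil =>
    intro off res hys hle hres
    have hfull : i + off = nums.length := by
      have := congrArg List.length hys
      simp [List.length_drop] at this
      omega
    rw [PySem.List.enumerate_nil, List.foldl_nil]
    exact IsMax_congr (fun i' j hg => by
      obtain ⟨_, hj, _⟩ := hg
      constructor
      · rintro (h | ⟨h1, h2⟩) <;> [exact Or.inl h; exact Or.inr ⟨h1, by omega⟩]
      · rintro (h | ⟨h1, h2⟩) <;> [exact Or.inl h; exact Or.inr ⟨h1, by omega⟩]) hres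
  | cons x ys ih =>
    intro off res hys hle hres
    have hlt : i + off < nums.length := by
      by_contra h
      rw [List.drop_eq_nil_of_le (by omega)] at hys
      exact List.cons_ne_nil x ys (hys ▸ rfl)
    have hx : nums.drop (i + off) = nums[i + off] :: nums.drop (i + off + 1) :=
      List.drop_eq_getElem_cons hlt
    rw [hx] at hys
    obtain ⟨hx1, hys'⟩ : x = nums[i + off] ∧ ys = nums.drop (i + off + 1) := by
      constructor <;> [exact (List.cons.injEq .. ▸ hys).1; exact (List.cons.injEq .. ▸ hys).2]
    rw [PySem.List.enumerate_cons, List.foldl_cons]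
    have hsumstep : (nums.take (i + off)).sum - (nums.take i).sum + x
        = (nums.take (i + off + 1)).sum - (nums.take i).sum := by
      rw [hx1, List.sum_take_succ nums (i + off) hlt]; ring
    have hstep : innerB k ((nums.take (i + off)).sum - (nums.take i).sum, res) ((off : Int), x)
        = ((nums.take (i + off + 1)).sum - (nums.take i).sum,
           if (nums.take (i + off + 1)).sum - (nums.take i).sum = k
           then max res ((off : Int) + 1) else res) := by
      simp only [innerB]
      rw [hsumstep]
    rw [hstep]
    have hres' : PairMax nums k (fun i' j => i' < i ∨ (i' = i ∧ j ≤ i + off + 1))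
        (if (nums.take (i + off + 1)).sum - (nums.take i).sum = k
         then max res ((off : Int) + 1) else res) := by
      obtain ⟨h0, hex, hub⟩ := hres
      by_cases hk : (nums.take (i + off + 1)).sum - (nums.take i).sum = k
      · rw [if_pos hk]
        have hg₀ : gd nums k i (i + off + 1) := ⟨by omega, by omega, hk⟩
        refine ⟨by omega, ?_, ?_⟩
        · rcases le_total ((off : Int) + 1) res with hle' | hle'
          · rw [max_eq_left hle']
            rcases hex with h | ⟨i', j, hg, hq, hr⟩
            · exact Or.inl h
            · refine Or.inr ⟨i', j, hg, ?_, hr⟩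
              rcases hq with h | ⟨h1, h2⟩ <;> [exact Or.inl h; exact Or.inr ⟨h1, by omega⟩]
          · rw [max_eq_right hle']
            exact Or.inr ⟨i, i + off + 1, hg₀, Or.inr ⟨rfl, le_refl _⟩, by push_cast; ring⟩
        · intro i' j hg hq
          rcases hq with h | ⟨h1, h2⟩
          · have := hub i' j hg (Or.inl h); omega
          · rcases Nat.lt_or_ge j (i + off + 1) with hj | hj
            · have := hub i' j hg (Or.inr ⟨h1, by omega⟩); omega
            · have hje : j = i + off + 1 := by omega
              have hv : (j : Int) - (i' : Int) = (off : Int) + 1 := by omega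
              rw [hv]; exact le_max_right _ _
      · rw [if_neg hk]
        refine ⟨h0, ?_, ?_⟩
        · rcases hex with h | ⟨i', j, hg, hq, hr⟩
          · exact Or.inl h
          · refine Or.inr ⟨i', j, hg, ?_, hr⟩
            rcases hq with h | ⟨h1, h2⟩ <;> [exact Or.inl h; exact Or.inr ⟨h1, by omega⟩]
        · intro i' j hg hq
          rcases hq with h | ⟨h1, h2⟩
          · exact hub i' j hg (Or.inl h)
          · rcases Nat.lt_or_ge j (i + off + 1) with hj | hj
            · exact hub i' j hg (Or.inr ⟨h1, by omega⟩)
            · have hje : j = i + off + 1 := by omega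
              obtain ⟨_, _, hsum⟩ := hg
              rw [hje, h1] at hsum
              exact absurd hsum hk
    have hcast : (off : Int) + 1 = ((off + 1 : Nat) : Int) := by push_cast; ring
    rw [hcast]
    have h := ih (off + 1) _ (by rw [hys', Nat.add_assoc]) (by omega) (by
      have e : i + (off + 1) = i + off + 1 := by omega
      rw [e]; exact hres')
    have e : i + (off + 1) = i + off + 1 := by omega
    rw [e] at h
    exact h

lemma B_outer (nums : List Int) (k : Int) : ∀ (cnt i : Nat) (res : Int),
    i + cnt = nums.length →
    PairMax nums k (fun i' _ => i' < i) res →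
    PairMax nums k (fun i' _ => i' < nums.length)
      ((PySem.List.pyRange (i : Int) (nums.length : Int) 1).foldl
        (fun res x =>
          ((PySem.List.enumerate (PySem.List.slice nums (some x) none) 0).foldl (innerB k) (0, res)).2)
        res) := by
  intro cnt
  induction cnt with
  | zero =>
    intro i res hlen hres
    have : i = nums.length := by omega
    subst this
    rw [PySem.List.pyRange_one_eq_nil (le_refl _), List.foldl_nil]
    exact hres
  | succ cnt ih =>
    intro i res hlen hres
    have hlt : (i : Int) < (nums.length : Int) := by
      have : i < nums.length := by omega
      exact_mod_cast this
    rw [PySem.List.pyRange_one_cons hlt, List.foldl_cons]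
    have hslice : PySem.List.slice nums (some (i : Int)) none = nums.drop i :=
      PySem.List.slice_from_natCast nums i
    have hinner := B_inner nums k i (nums.drop i) 0 res (by simp) (by omega)
      (IsMax_congr (fun i' j hg => by
        obtain ⟨hij, _, _⟩ := hg
        constructor
        · intro h; exact Or.inl h
        · rintro (h | ⟨h1, h2⟩) <;> omega) hres)
    simp only [Nat.add_zero, Nat.cast_zero, sub_self] at hinner
    rw [hslice]
    have hres' : PairMax nums k (fun i' _ => i' < i + 1)
        (((PySem.List.enumerate (nums.drop i) 0).foldl (innerB k) (0, res)).2) := by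
      refine IsMax_congr (fun i' j hg => ?_) hinner
      obtain ⟨hij, hj, _⟩ := hg
      constructor
      · rintro (h | ⟨h1, h2⟩) <;> omega
      · intro h
        rcases Nat.lt_or_ge i' i with h' | h'
        · exact Or.inl h'
        · exact Or.inr ⟨by omega, hj⟩
    have hcast : (i : Int) + 1 = ((i + 1 : Nat) : Int) := by push_cast; ring
    rw [hcast]
    exact ih (i + 1) _ (by omega) hres'

lemma B_isMax (nums : List Int) (k : Int) :
    PairMax nums k (fun i' _ => i' < nums.length) (maxSubArrayLen_alt nums k) := by
  unfold maxSubArrayLen_alt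
  have h := B_outer nums k nums.length 0 0 (by omega)
    (IsMax_init nums k _ (fun i j hg hq => by omega))
  simpa using h

-- ===== VERDICT (by name: the statement is the Claim_ definition above) =====
theorem maxSubArrayLen_spec : Claim_equal_maxSubArrayLen := by
  intro nums k _
  exact IsMax_unique
    (fun i j hg => hg.2.1)
    (fun i j hg => by obtain ⟨h1, h2, _⟩ := hg; omega)
    (A_isMax nums k) (B_isMax nums k)
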